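-- pv_equiv track=rewrite | github.com/jbrodovsky/geophysical_nav | src/data_management/m77t.py | find_periods
-- ===== SOURCE A (Python) =====
-- def find_periods(mask: list[int | bool]) -> list:
--     """
--     Find the start and stop indecies from a boolean mask.
--     """
--     # Calculate the starting and ending indices for each period
--     periods = []
--     start_index = None
--
--     for idx, is_true in enumerate(mask):
--         if not is_true and start_index is None:
--             start_index = idx
--         elif is_true and start_index is not None:
--             end_index = idx - 1
--             periods.append((start_index, end_index))
--             start_index = None
--
--     # If the last period extends until the end of the mask, add it
--     if start_index is not None:
--         end_index = len(mask) - 1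
--         periods.append((start_index, end_index))
--
--     return periods
-- ===== SOURCE B (Python) =====
-- def find_periods(mask: list[int | bool]) -> list:
--     """Find the start and stop indices from a boolean mask (falsy runs)."""
--     idxs = [i for i, v in enumerate(mask) if not v]
--     periods = []
--     run = None  # (start, prev)
--     for i in idxs:
--         if run is None:
--             run = (i, i)
--         elif i == run[1] + 1:
--             run = (run[0], i)
--         else:
--             periods.append(run)
--             run = (i, i)
--     if run is not None:
--         periods.append(run)
--     return periods
-- ===== Notes on version B (the rewrite author's own statement) =====
-- stated objective: alternative
-- what changed: Instead of one stateful scan carrying an open start index past truthy elements, B first collects the falsy indices and then groups them into maximal consecutive runs, closing a run whenever the next falsy index is not prev+1.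
import Mathlib
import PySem

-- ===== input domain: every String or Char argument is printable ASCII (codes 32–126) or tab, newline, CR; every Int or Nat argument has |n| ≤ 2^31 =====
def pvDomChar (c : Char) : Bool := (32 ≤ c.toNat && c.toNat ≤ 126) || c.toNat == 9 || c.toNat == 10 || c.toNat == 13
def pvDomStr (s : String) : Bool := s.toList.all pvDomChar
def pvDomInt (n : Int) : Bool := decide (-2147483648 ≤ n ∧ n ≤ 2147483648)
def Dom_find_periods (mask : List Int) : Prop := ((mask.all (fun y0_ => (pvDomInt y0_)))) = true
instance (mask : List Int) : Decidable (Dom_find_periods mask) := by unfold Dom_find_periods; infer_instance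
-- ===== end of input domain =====

-- B groups the precomputed list of falsy indices into consecutive runs instead of A's single stateful scan; alternative decomposition, same O(n) cost.


-- ===== PORT A =====
-- A's for-loop over enumerate(mask) with state (periods, start_index); truthiness of an int is v ≠ 0.
def find_periods_loop : List Int → Int → List (Int × Int) → Option Int → List (Int × Int) × Option Int
  | [], _, periods, s => (periods, s)
  | v :: t, idx, periods, none =>
      if v = 0 then find_periods_loop t (idx + 1) periods (some idx)
      else find_periods_loop t (idx + 1) periods none
  | v :: t, idx, periods, some st =>
      if v ≠ 0 then find_periods_loop t (idx + 1) (periods ++ [(st, idx - 1)]) none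
      else find_periods_loop t (idx + 1) periods (some st)

def find_periods (mask : List Int) : List (Int × Int) :=
  let r := find_periods_loop mask 0 [] none
  match r.2 with
  | some st => r.1 ++ [(st, (mask.length : Int) - 1)]
  | none => r.1

-- ===== PORT B =====
-- the comprehension [i for i, v in enumerate(mask) if not v]
def bFalsy : List Int → Int → List Int
  | [], _ => []
  | v :: t, i => if v = 0 then i :: bFalsy t (i + 1) else bFalsy t (i + 1)

-- B's loop over the falsy indices with state run = Option (start, prev)
def bRuns : List Int → Option (Int × Int) → List (Int × Int) → List (Int × Int)
  | [], none, acc => acc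
  | [], some rp, acc => acc ++ [rp]
  | i :: t, none, acc => bRuns t (some (i, i)) acc
  | i :: t, some (rs, p), acc =>
      if i = p + 1 then bRuns t (some (rs, i)) acc
      else bRuns t (some (i, i)) (acc ++ [(rs, p)])

def find_periods_alt (mask : List Int) : List (Int × Int) :=
  bRuns (bFalsy mask 0) none []

-- ===== PRECONDITION & SPEC =====
def Spec_find_periods (mask : List Int) (out : List (Int × Int)) : Prop := out = find_periods_alt mask
instance (mask : List Int) (out : List (Int × Int)) : Decidable (Spec_find_periods mask out) := by unfold Spec_find_periods; infer_instance

-- ===== CLAIM (what is proved, stated in full; the proofs are below) =====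
def Claim_equal_find_periods : Prop := ∀ (mask : List Int), Dom_find_periods mask → Spec_find_periods mask (find_periods mask)

-- ===== LEMMAS AND PROOFS =====

/-- A's final step as a function of the loop result and the exclusive end index. -/
def finishA (r : List (Int × Int) × Option Int) (n : Int) : List (Int × Int) :=
  match r.2 with
  | some st => r.1 ++ [(st, n - 1)]
  | none => r.1

theorem mem_bFalsy_ge : ∀ (t : List Int) (i j : Int), j ∈ bFalsy t i → i ≤ j := by
  intro t
  induction t with
  | nil => intro i j h; simp [bFalsy] at h
  | cons v r ih =>
      intro i j h
      by_cases hv : v = 0 <;> simp [bFalsy, hv] at h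
      · rcases h with h | h
        · omega
        · have := ih (i + 1) j h; omega
      · have := ih (i + 1) j h; omega

theorem bRuns_close (t : List Int) (rs p : Int) (acc : List (Int × Int))
    (h : ∀ j ∈ t, p + 1 < j) :
    bRuns t (some (rs, p)) acc = bRuns t none (acc ++ [(rs, p)]) := by
  cases t with
  | nil => simp [bRuns]
  | cons j r =>
      have hj : p + 1 < j := h j (by simp)
      have : ¬ (j = p + 1) := by omega
      simp [bRuns, this]

theorem main_lemma : ∀ (t : List Int) (i : Int) (acc : List (Int × Int)),
    (finishA (find_periods_loop t i acc none) (i + t.length) = bRuns (bFalsy t i) none acc) ∧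
    (∀ st, finishA (find_periods_loop t i acc (some st)) (i + t.length)
        = bRuns (bFalsy t i) (some (st, i - 1)) acc) := by
  intro t
  induction t with
  | nil =>
      intro i acc
      constructor
      · simp [find_periods_loop, bFalsy, finishA, bRuns]
      · intro st; simp [find_periods_loop, bFalsy, finishA, bRuns]
  | cons v r ih =>
      intro i acc
      have e1 : (i + 1) + (r.length : Int) = i + ((v :: r).length : Int) := by
        simp [List.length_cons]; ring
      have e2 : (i : Int) + 1 - 1 = i := by ring
      constructor
      · by_cases hv : v = 0
        · simp only [find_periods_loop, bFalsy, hv, if_pos rfl, bRuns]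
          have h := (ih (i + 1) acc).2 i
          rw [e1, e2] at h
          exact h
        · simp only [find_periods_loop, bFalsy, if_neg hv]
          have h := (ih (i + 1) acc).1
          rw [e1] at h
          exact h
      · intro st
        by_cases hv : v = 0
        · simp only [find_periods_loop, bFalsy, hv, if_pos rfl,
            if_neg (by simp : ¬ ((0 : Int) ≠ 0)), if_true, bRuns]
          rw [if_pos (by ring : i = i - 1 + 1)]
          have h := (ih (i + 1) acc).2 st
          rw [e1, e2] at h
          exact h
        · have hclose : bRuns (bFalsy r (i + 1)) (some (st, i - 1)) acc
              = bRuns (bFalsy r (i + 1)) none (acc ++ [(st, i - 1)]) := by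
            apply bRuns_close
            intro j hj
            have := mem_bFalsy_ge r (i + 1) j hj
            omega
          simp only [find_periods_loop, bFalsy, if_neg hv, if_pos hv, hclose]
          have h := (ih (i + 1) (acc ++ [(st, i - 1)])).1
          rw [e1] at h
          exact h

-- ===== VERDICT (by name: the statement is the Claim_ definition above) =====
theorem find_periods_spec : Claim_equal_find_periods := by
  intro mask _
  unfold Spec_find_periods find_periods find_periods_alt
  have h := (main_lemma mask 0 []).1
  simpa [finishA] using h
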